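-- pv_equiv track=rewrite | github.com/adesulco/nba-playoffs-monitor | packages/content-engine/src/content_engine/quality/flagship.py | is_flagship_football
-- ===== SOURCE A (Python) =====
-- from typing import Any
--
-- _FOOTBALL_FLAGSHIP_PAIRS = {
--     "epl": [
--         # North London derby
--         frozenset({"arsenal", "tottenham", "tottenham hotspur"}),
--         # Manchester rivalries
--         frozenset({"manchester united", "liverpool"}),
--         frozenset({"manchester united", "manchester city"}),
--         # Merseyside derby
--         frozenset({"liverpool", "everton"}),
--         # London top-tier derbies
--         frozenset({"chelsea", "arsenal"}),
--         frozenset({"chelsea", "tottenham", "tottenham hotspur"}),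
--         # Big-game matchups
--         frozenset({"liverpool", "manchester city"}),
--         frozenset({"arsenal", "manchester city"}),
--         frozenset({"liverpool", "arsenal"}),
--         frozenset({"chelsea", "liverpool"}),
--         frozenset({"manchester united", "arsenal"}),
--         frozenset({"manchester united", "chelsea"}),
--     ],
--     "liga-1-id": [
--         # El Clasico Indonesia (per existing /derby/persija-persib surface)
--         frozenset({"persija jakarta", "persib bandung"}),
--         frozenset({"persija", "persib"}),
--         # Derby JATIM (East Java rivalry — biggest fan culture clash)
--         frozenset({"persebaya surabaya", "arema fc"}),
--         frozenset({"persebaya", "arema"}),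
--         # Derby Jawa Tengah (Solo vs Semarang)
--         frozenset({"persis solo", "psis semarang"}),
--         frozenset({"persis", "psis"}),
--         # Derby Yogyakarta (Sleman vs PSIM)
--         frozenset({"pss sleman", "psim"}),
--         frozenset({"pss sleman", "psim yogyakarta"}),
--         # Derby Jabodetabek (Jakarta vs Tangerang)
--         frozenset({"persija jakarta", "persita"}),
--         frozenset({"persija", "persita"}),
--         # Sumatra-Sulawesi-Java cross-island rivalries
--         frozenset({"psm makassar", "persib bandung"}),
--         frozenset({"psm makassar", "persija jakarta"}),
--         frozenset({"semen padang", "psm makassar"}),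
--         # Bali-Java meets
--         frozenset({"bali united", "persija jakarta"}),
--         frozenset({"bali united", "persib bandung"}),
--         # Borneo-Java showdown (title race)
--         frozenset({"pusamania borneo", "persib bandung"}),
--         frozenset({"pusamania borneo", "persija jakarta"}),
--     ],
-- }
--
-- def is_flagship_football(fixture: dict[str, Any]) -> tuple[bool, str | None]:
--     """Returns (is_flagship, reason).
--
--     Phase 1 explicit-only. Pass a normalized fixture dict — uses
--     `league_id`, `home_team`, `away_team` fields.
--     """
--     league_id = fixture.get("league_id") or fixture.get("league")
--     home = (fixture.get("home_team") or "").lower().strip()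
--     away = (fixture.get("away_team") or "").lower().strip()
--     pair = frozenset({home, away})
--
--     flagship_pairs = _FOOTBALL_FLAGSHIP_PAIRS.get(league_id, [])
--     for fp in flagship_pairs:
--         # frozenset intersection: any home/away name matches the
--         # flagship pair? We require BOTH names to overlap.
--         if pair & fp == pair and len(pair) == 2:
--             return True, f"flagship-pair derby ({home} vs {away})"
--
--     return False, None
-- ===== SOURCE B (Python) =====
-- from typing import Any
--
-- _FOOTBALL_FLAGSHIP_PAIRS = {
--     "epl": [
--         frozenset({"arsenal", "tottenham", "tottenham hotspur"}),
--         frozenset({"manchester united", "liverpool"}),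
--         frozenset({"manchester united", "manchester city"}),
--         frozenset({"liverpool", "everton"}),
--         frozenset({"chelsea", "arsenal"}),
--         frozenset({"chelsea", "tottenham", "tottenham hotspur"}),
--         frozenset({"liverpool", "manchester city"}),
--         frozenset({"arsenal", "manchester city"}),
--         frozenset({"liverpool", "arsenal"}),
--         frozenset({"chelsea", "liverpool"}),
--         frozenset({"manchester united", "arsenal"}),
--         frozenset({"manchester united", "chelsea"}),
--     ],
--     "liga-1-id": [
--         frozenset({"persija jakarta", "persib bandung"}),
--         frozenset({"persija", "persib"}),
--         frozenset({"persebaya surabaya", "arema fc"}),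
--         frozenset({"persebaya", "arema"}),
--         frozenset({"persis solo", "psis semarang"}),
--         frozenset({"persis", "psis"}),
--         frozenset({"pss sleman", "psim"}),
--         frozenset({"pss sleman", "psim yogyakarta"}),
--         frozenset({"persija jakarta", "persita"}),
--         frozenset({"persija", "persita"}),
--         frozenset({"psm makassar", "persib bandung"}),
--         frozenset({"psm makassar", "persija jakarta"}),
--         frozenset({"semen padang", "psm makassar"}),
--         frozenset({"bali united", "persija jakarta"}),
--         frozenset({"bali united", "persib bandung"}),
--         frozenset({"pusamania borneo", "persib bandung"}),
--         frozenset({"pusamania borneo", "persija jakarta"}),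
--     ],
-- }
--
-- # Built once at import: per league, every ordered 2-combination (as an
-- # (lo, hi) tuple with lo < hi) drawn from each alias group, so the runtime
-- # check is a single set-membership test instead of a scan over the groups.
-- _PAIR_INDEX = {
--     league: {(x, y) for fp in fps for x in fp for y in fp if x < y}
--     for league, fps in _FOOTBALL_FLAGSHIP_PAIRS.items()
-- }
--
--
-- def is_flagship_football(fixture: dict[str, Any]) -> tuple[bool, str | None]:
--     """Returns (is_flagship, reason)."""
--     league_id = fixture.get("league_id") or fixture.get("league")
--     home = (fixture.get("home_team") or "").lower().strip()
--     away = (fixture.get("away_team") or "").lower().strip()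
--     key = (home, away) if home <= away else (away, home)
--
--     if key in _PAIR_INDEX.get(league_id, ()):
--         return True, f"flagship-pair derby ({home} vs {away})"
--     return False, None
-- ===== Notes on version B (the rewrite author's own statement) =====
-- stated objective: alternative
-- what changed: Replaces the per-call scan over the league's flagship frozensets (a set-intersection subset test on each) by a module-load-time index mapping each league to the set of all sorted 2-combinations of each alias group, so the call does a single set-membership test on the sorted (home, away) tuple.
import Mathlib
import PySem

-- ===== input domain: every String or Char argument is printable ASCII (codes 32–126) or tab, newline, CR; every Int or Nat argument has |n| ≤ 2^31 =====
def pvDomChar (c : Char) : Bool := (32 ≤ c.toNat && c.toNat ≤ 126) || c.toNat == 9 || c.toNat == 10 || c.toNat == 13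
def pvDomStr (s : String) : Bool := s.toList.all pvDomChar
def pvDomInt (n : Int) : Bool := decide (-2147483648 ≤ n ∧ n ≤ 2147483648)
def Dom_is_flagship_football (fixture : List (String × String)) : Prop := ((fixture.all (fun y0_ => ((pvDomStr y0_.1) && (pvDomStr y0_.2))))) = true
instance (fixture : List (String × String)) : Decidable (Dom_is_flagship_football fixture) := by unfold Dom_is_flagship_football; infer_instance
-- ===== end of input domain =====

-- B replaces A's per-call scan over the league's flagship frozensets by a precomputed
-- league → set-of-sorted-pairs index, so each call is a single set-membership test (alternative algorithm; no measured speed claim).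


-- ===== PORT A =====
-- the alias groups of _FOOTBALL_FLAGSHIP_PAIRS, as plain literal lists (shared data, not code)
def pvAliasesEpl : List (List String) :=
  [["arsenal", "tottenham", "tottenham hotspur"],
   ["manchester united", "liverpool"],
   ["manchester united", "manchester city"],
   ["liverpool", "everton"],
   ["chelsea", "arsenal"],
   ["chelsea", "tottenham", "tottenham hotspur"],
   ["liverpool", "manchester city"],
   ["arsenal", "manchester city"],
   ["liverpool", "arsenal"],
   ["chelsea", "liverpool"],
   ["manchester united", "arsenal"],
   ["manchester united", "chelsea"]]

def pvAliasesLiga : List (List String) :=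
  [["persija jakarta", "persib bandung"],
   ["persija", "persib"],
   ["persebaya surabaya", "arema fc"],
   ["persebaya", "arema"],
   ["persis solo", "psis semarang"],
   ["persis", "psis"],
   ["pss sleman", "psim"],
   ["pss sleman", "psim yogyakarta"],
   ["persija jakarta", "persita"],
   ["persija", "persita"],
   ["psm makassar", "persib bandung"],
   ["psm makassar", "persija jakarta"],
   ["semen padang", "psm makassar"],
   ["bali united", "persija jakarta"],
   ["bali united", "persib bandung"],
   ["pusamania borneo", "persib bandung"],
   ["pusamania borneo", "persija jakarta"]]

-- _FOOTBALL_FLAGSHIP_PAIRS: each alias group as a frozenset (PySem.Set)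
def pvFlagshipDict : PySem.Dict String (List (PySem.Set String)) :=
  PySem.Dict.mk [("epl", pvAliasesEpl.map PySem.Set.ofList),
                 ("liga-1-id", pvAliasesLiga.map PySem.Set.ofList)]

-- `x or y` on Optional[str] operands: first operand unless it is None or "" (falsy)
def pvOrStr (a b : Option String) : Option String :=
  match a with
  | some s => if s == "" then b else some s
  | none => b

-- the for-loop of A: first fp with pair & fp == pair and len(pair) == 2 returns the reason
def pvLoopA (home away : String) (pair : PySem.Set String) :
    List (PySem.Set String) → Bool × Option String
  | [] => (false, none)
  | fp :: rest =>
    if PySem.Set.equal (PySem.Set.inter pair fp) pair && (PySem.Set.len pair == 2) then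
      (true, some ("flagship-pair derby (" ++ home ++ " vs " ++ away ++ ")"))
    else pvLoopA home away pair rest

def is_flagship_football (fixture : List (String × String)) : Bool × Option String :=
  let d := PySem.Dict.mk fixture
  let league_id := pvOrStr (d.get? "league_id") (d.get? "league")
  let home := PySem.Str.strip (PySem.Str.lower ((d.get? "home_team").getD ""))
  let away := PySem.Str.strip (PySem.Str.lower ((d.get? "away_team").getD ""))
  let pair := PySem.Set.ofList [home, away]
  let flagship_pairs :=
    match league_id with
    | some s => (pvFlagshipDict.get? s).getD []
    | none => []
  pvLoopA home away pair flagship_pairs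

-- ===== PORT B =====
-- {(x, y) for x in fp for y in fp if x < y}: all sorted 2-combinations of an alias group
def pvCombos (fp : List String) : List (String × String) :=
  fp.flatMap (fun x => fp.flatMap (fun y => if x < y then [(x, y)] else []))

-- _PAIR_INDEX: built once, league → set of all sorted 2-combinations of its alias groups
def pvPairIndex : PySem.Dict String (PySem.Set (String × String)) :=
  PySem.Dict.mk [("epl", PySem.Set.ofList (pvAliasesEpl.flatMap pvCombos)),
                 ("liga-1-id", PySem.Set.ofList (pvAliasesLiga.flatMap pvCombos))]

def is_flagship_football_alt (fixture : List (String × String)) : Bool × Option String :=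
  let d := PySem.Dict.mk fixture
  let league_id := pvOrStr (d.get? "league_id") (d.get? "league")
  let home := PySem.Str.strip (PySem.Str.lower ((d.get? "home_team").getD ""))
  let away := PySem.Str.strip (PySem.Str.lower ((d.get? "away_team").getD ""))
  let key := if home ≤ away then (home, away) else (away, home)
  let idx :=
    match league_id with
    | some s => (pvPairIndex.get? s).getD PySem.Set.empty
    | none => PySem.Set.empty
  if PySem.Set.contains idx key then
    (true, some ("flagship-pair derby (" ++ home ++ " vs " ++ away ++ ")"))
  else (false, none)

-- ===== PRECONDITION & SPEC =====
def Spec_is_flagship_football (fixture : List (String × String)) (out : Bool × Option String) : Prop := out = is_flagship_football_alt fixture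
instance (fixture : List (String × String)) (out : Bool × Option String) : Decidable (Spec_is_flagship_football fixture out) := by unfold Spec_is_flagship_football; infer_instance

-- ===== CLAIM (what is proved, stated in full; the proofs are below) =====
def Claim_equal_is_flagship_football : Prop := ∀ (fixture : List (String × String)), Dom_is_flagship_football fixture → Spec_is_flagship_football fixture (is_flagship_football fixture)

-- ===== LEMMAS AND PROOFS =====

-- A's match condition on one alias group, reduced to plain list facts
theorem pvMatch_eq (h a : String) (fp : List String) :
    (PySem.Set.equal (PySem.Set.inter (PySem.Set.ofList [h, a]) (PySem.Set.ofList fp))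
        (PySem.Set.ofList [h, a]) && (PySem.Set.len (PySem.Set.ofList [h, a]) == 2)) =
      (decide (h ∈ fp) && decide (a ∈ fp) && decide (h ≠ a)) := by
  by_cases hha : h = a
  · subst hha
    simp [PySem.Set.ofList, PySem.Set.add, PySem.Set.len, PySem.Set.contains]
  · have hpair : PySem.Set.ofList [h, a] = [h, a] := by
      show PySem.Set.add (PySem.Set.add PySem.Set.empty h) a = [h, a]
      simp [PySem.Set.add, PySem.Set.empty, PySem.Set.contains, List.contains_eq_mem,
        Ne.symm hha]
    rw [hpair]
    simp only [PySem.Set.equal, PySem.Set.inter, PySem.Set.issubset, PySem.Set.len,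
      PySem.Set.contains, List.contains_eq_mem, List.filter]
    by_cases hh : h ∈ fp <;> by_cases ha : a ∈ fp <;>
      simp [hh, ha, hha, Ne.symm hha, PySem.Set.mem_ofList]

-- B's sorted key lies in the 2-combinations of fp iff A's subset test fires on fp
theorem pvKey_mem_combos (h a : String) (fp : List String) :
    ((if h ≤ a then (h, a) else (a, h)) ∈ pvCombos fp) ↔ (h ∈ fp ∧ a ∈ fp ∧ h ≠ a) := by
  have key : ∀ p q : String, ((p, q) ∈ pvCombos fp) ↔ (p ∈ fp ∧ q ∈ fp ∧ p < q) := by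
    intro p q
    simp only [pvCombos, List.mem_flatMap]
    constructor
    · rintro ⟨x, hx, y, hy, hm⟩
      split_ifs at hm with hxy
      · simp only [List.mem_singleton, Prod.mk.injEq] at hm
        obtain ⟨rfl, rfl⟩ := hm; exact ⟨hx, hy, hxy⟩
      · simp at hm
    · rintro ⟨hp, hq, hlt⟩
      exact ⟨p, hp, q, hq, by simp [hlt]⟩
  split_ifs with hle
  · rw [key]
    constructor
    · rintro ⟨h1, h2, h3⟩; exact ⟨h1, h2, ne_of_lt h3⟩
    · rintro ⟨h1, h2, h3⟩; exact ⟨h1, h2, lt_of_le_of_ne hle h3⟩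
  · rw [key]
    have hlt : a < h := lt_of_not_ge hle
    constructor
    · rintro ⟨h1, h2, _⟩; exact ⟨h2, h1, (ne_of_lt hlt).symm⟩
    · rintro ⟨h1, h2, _⟩; exact ⟨h2, h1, hlt⟩

-- the loop returns the hit value iff some group matches
theorem pvLoopA_eq_any (home away : String) (pair : PySem.Set String)
    (l : List (PySem.Set String)) :
    pvLoopA home away pair l =
      (if l.any (fun fp => PySem.Set.equal (PySem.Set.inter pair fp) pair &&
          (PySem.Set.len pair == 2)) then
        (true, some ("flagship-pair derby (" ++ home ++ " vs " ++ away ++ ")"))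
      else (false, none)) := by
  induction l with
  | nil => rfl
  | cons fp rest ih => simp only [pvLoopA, List.any_cons]; split_ifs with hc <;> simp_all <;> tauto

-- scan over one league's alias groups = membership in that league's combo index
theorem pvScan_eq_lookup (home away : String) (L : List (List String)) :
    pvLoopA home away (PySem.Set.ofList [home, away]) (L.map PySem.Set.ofList) =
      (if PySem.Set.contains (PySem.Set.ofList (L.flatMap pvCombos))
          (if home ≤ away then (home, away) else (away, home)) then
        (true, some ("flagship-pair derby (" ++ home ++ " vs " ++ away ++ ")"))
      else (false, none)) := by
  rw [pvLoopA_eq_any]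
  have hcond : (List.map PySem.Set.ofList L).any (fun fp =>
      PySem.Set.equal (PySem.Set.inter (PySem.Set.ofList [home, away]) fp)
        (PySem.Set.ofList [home, away]) && (PySem.Set.len (PySem.Set.ofList [home, away]) == 2)) =
      PySem.Set.contains (PySem.Set.ofList (L.flatMap pvCombos))
        (if home ≤ away then (home, away) else (away, home)) := by
    rw [Bool.eq_iff_iff]
    simp only [List.any_map, Function.comp, List.any_eq_true, pvMatch_eq,
      PySem.Set.contains, List.contains_eq_mem, decide_eq_true_iff, PySem.Set.mem_ofList,
      List.mem_flatMap, Bool.and_eq_true]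
    constructor
    · rintro ⟨fp, hfp, ⟨hh, ha⟩, hne⟩
      exact ⟨fp, hfp, (pvKey_mem_combos home away fp).2 ⟨hh, ha, hne⟩⟩
    · rintro ⟨fp, hfp, hk⟩
      obtain ⟨hh, ha, hne⟩ := (pvKey_mem_combos home away fp).1 hk
      exact ⟨fp, hfp, ⟨hh, ha⟩, hne⟩
  rw [hcond]

-- ===== VERDICT (by name: the statement is the Claim_ definition above) =====
theorem is_flagship_football_spec : Claim_equal_is_flagship_football := by
  intro fixture _
  unfold Spec_is_flagship_football
  simp only [is_flagship_football, is_flagship_football_alt]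
  cases hlg : pvOrStr ((PySem.Dict.mk fixture).get? "league_id")
      ((PySem.Dict.mk fixture).get? "league") with
  | none => rfl
  | some s =>
    by_cases he : s = "epl"
    · subst he
      exact pvScan_eq_lookup _ _ pvAliasesEpl
    · by_cases hl : s = "liga-1-id"
      · subst hl
        exact pvScan_eq_lookup _ _ pvAliasesLiga
      · have h1 : (pvFlagshipDict.get? s).getD [] = [] := by
          simp [pvFlagshipDict, PySem.Dict.get?, Ne.symm he, Ne.symm hl]
        have h2 : (pvPairIndex.get? s).getD PySem.Set.empty = PySem.Set.empty := by
          simp [pvPairIndex, PySem.Dict.get?, Ne.symm he, Ne.symm hl]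
        simp only [h1, h2]
        rfl
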